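-- pv_equiv track=rewrite | github.com/Tam1032/ICTC_MEC_Demo | MEC_Environment/gym_environment.py | _initialize_edge_connections
-- ===== SOURCE A (Python) =====
-- def _initialize_edge_connections(num_edges):
--     """
--     Initializes the connections and hop distances between edge servers.
--     This implementation creates a ring topology.
--     """
--     connections = {}
--     for i in range(num_edges):
--         for j in range(num_edges):
--             if i == j:
--                 continue
--             # Calculate shortest distance in a ring topology
--             hop_distance = min(abs(i - j), num_edges - abs(i - j))
--             connections[(i, j)] = hop_distance
--     return connections
-- ===== SOURCE B (Python) =====
-- def _initialize_edge_connections(num_edges):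
--     """Ring-topology hop distances via a precomputed distance profile.
--
--     The hop distance from i to j on an n-ring depends only on (j - i) mod n,
--     so compute the profile hop[d] = min(d, n - d) once; row i of the table is
--     then just that profile rotated right by i positions (two slices), and
--     enumerate pairs each value with its column index.
--     """
--     n = num_edges
--     hop = [min(d, n - d) for d in range(n)]
--     connections = {}
--     for i in range(n):
--         row = hop[n - i:] + hop[:n - i]
--         for j, h in enumerate(row):
--             if j != i:
--                 connections[(i, j)] = h
--     return connections
-- ===== Notes on version B (the rewrite author's own statement) =====
-- stated objective: alternative
-- what changed: Instead of computing min/abs per ordered pair, B precomputes the n-entry ring-distance profile hop[d]=min(d,n-d) once and materialises each row as a slice-rotation of that profile, pairing values with column indices via enumerate; the per-pair distance computation disappears.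
import Mathlib
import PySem

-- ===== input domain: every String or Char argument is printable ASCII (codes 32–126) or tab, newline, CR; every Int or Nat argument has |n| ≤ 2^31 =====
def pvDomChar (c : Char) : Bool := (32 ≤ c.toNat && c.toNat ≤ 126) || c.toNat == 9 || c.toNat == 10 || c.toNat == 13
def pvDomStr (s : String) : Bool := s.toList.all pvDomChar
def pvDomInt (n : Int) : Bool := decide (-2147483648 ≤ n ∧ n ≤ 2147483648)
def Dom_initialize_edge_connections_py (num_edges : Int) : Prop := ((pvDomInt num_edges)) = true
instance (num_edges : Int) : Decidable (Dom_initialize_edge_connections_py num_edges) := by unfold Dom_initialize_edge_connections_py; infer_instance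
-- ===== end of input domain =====

-- B precomputes the n-entry ring-distance profile once and emits each row as a slice-rotation of
-- that profile paired with column indices by enumerate, instead of a per-pair abs/min computation.


-- ===== PORT A =====
def initialize_edge_connections_py (num_edges : Int) : List (Int × Int × Int) :=
  let connections := (PySem.List.pyRange 0 num_edges 1).foldl (fun d i =>
    (PySem.List.pyRange 0 num_edges 1).foldl (fun d j =>
      if i == j then d
      else d.insert (i, j) (min |i - j| (num_edges - |i - j|))) d)
    PySem.Dict.empty
  connections.items.map (fun p => (p.1.1, p.1.2, p.2))

-- ===== PORT B =====
def initialize_edge_connections_py_alt (num_edges : Int) : List (Int × Int × Int) :=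
  let n := num_edges
  let hop := (PySem.List.pyRange 0 n 1).map (fun d => min d (n - d))
  let connections := (PySem.List.pyRange 0 n 1).foldl (fun d i =>
    let row := PySem.List.slice hop (some (n - i)) none ++ PySem.List.slice hop none (some (n - i))
    (PySem.List.enumerate row 0).foldl (fun d p =>
      if p.1 != i then d.insert (i, p.1) p.2 else d) d)
    PySem.Dict.empty
  connections.items.map (fun p => (p.1.1, p.1.2, p.2))

-- ===== PRECONDITION & SPEC =====
def Spec_initialize_edge_connections_py (num_edges : Int) (out : List (Int × Int × Int)) : Prop := out = initialize_edge_connections_py_alt num_edges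
instance (num_edges : Int) (out : List (Int × Int × Int)) : Decidable (Spec_initialize_edge_connections_py num_edges out) := by unfold Spec_initialize_edge_connections_py; infer_instance

-- ===== CLAIM (what is proved, stated in full; the proofs are below) =====
def Claim_equal_initialize_edge_connections_py : Prop := ∀ (num_edges : Int), Dom_initialize_edge_connections_py num_edges → Spec_initialize_edge_connections_py num_edges (initialize_edge_connections_py num_edges)

-- ===== LEMMAS AND PROOFS =====

-- the hop-distance profile B precomputes
def pvHop (n : Int) : List Int := (PySem.List.pyRange 0 n 1).map (fun d => min d (n - d))

lemma pvHop_length (n : Int) : (pvHop n).length = n.toNat := by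
  simp [pvHop, PySem.List.length_pyRange_one]

lemma pvHop_getElem (n : Int) (k : Nat) (hk : k < (pvHop n).length) :
    (pvHop n)[k] = min (k : Int) (n - (k : Int)) := by
  simp only [pvHop, List.getElem_map, PySem.List.getElem_pyRange_one, zero_add]

-- element j of B's rotated row i is exactly the value A computes for the pair (i, j)
lemma pvRow_getD (n i j : Int) (hi0 : 0 ≤ i) (hin : i < n) (hj0 : 0 ≤ j) (hjn : j < n) :
    PySem.List.pyGetD (PySem.List.slice (pvHop n) (some (n - i)) none
        ++ PySem.List.slice (pvHop n) none (some (n - i))) j 0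
      = min |i - j| (n - |i - j|) := by
  have hlen := pvHop_length n
  have hm : (n - i).toNat ≤ (pvHop n).length := by rw [hlen]; omega
  have hrowlen : (PySem.List.slice (pvHop n) (some (n - i)) none
      ++ PySem.List.slice (pvHop n) none (some (n - i))).length = n.toNat := by
    rw [PySem.List.slice_from _ (by omega), PySem.List.slice_to _ (by omega)]
    simp [List.length_drop, List.length_take, hlen]; omega
  rw [PySem.List.slice_from _ (by omega), PySem.List.slice_to _ (by omega)]
  rw [PySem.List.slice_from _ (by omega), PySem.List.slice_to _ (by omega)] at hrowlen
  rw [PySem.List.pyGetD_eq_getElem _ 0 hj0 (by rw [hrowlen]; omega)]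
  have hdl : ((pvHop n).drop (n - i).toNat).length = i.toNat := by
    rw [List.length_drop, hlen]; omega
  by_cases hcase : j.toNat < i.toNat
  · rw [List.getElem_append_left (by rw [hdl]; omega)]
    rw [List.getElem_drop, pvHop_getElem]
    have h1 : (((n - i).toNat + j.toNat : Nat) : Int) = n - i + j := by push_cast; omega
    rw [h1, abs_of_pos (by omega)]
    omega
  · rw [List.getElem_append_right (by rw [hdl]; omega)]
    simp only [hdl]
    rw [List.getElem_take, pvHop_getElem]
    have h1 : ((j.toNat - i.toNat : Nat) : Int) = j - i := by omega
    rw [h1, abs_of_nonpos (by omega)]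
    omega

-- ===== VERDICT (by name: the statement is the Claim_ definition above) =====
theorem initialize_edge_connections_py_spec : Claim_equal_initialize_edge_connections_py := by
  intro n _
  unfold Spec_initialize_edge_connections_py
  unfold initialize_edge_connections_py initialize_edge_connections_py_alt
  simp only
  congr 1
  congr 1
  -- the two outer loops agree step by step for every i in range(n)
  apply PySem.List.foldl_congr_mem
  intro d i hi
  obtain ⟨hi0, hin⟩ := PySem.List.mem_pyRange_one.mp hi
  -- B's inner loop: enumerate of the rotated row is a map over range(n)
  have hrowlen : (PySem.List.slice (pvHop n) (some (n - i)) none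
      ++ PySem.List.slice (pvHop n) none (some (n - i))).length = n.toNat := by
    rw [PySem.List.slice_from _ (by omega), PySem.List.slice_to _ (by omega)]
    simp [List.length_drop, List.length_take, pvHop_length]; omega
  rw [show ((PySem.List.pyRange 0 n 1).map fun d => min d (n - d)) = pvHop n from rfl]
  rw [PySem.List.enumerate_eq_map_pyRange _ (0 : Int), List.foldl_map]
  simp only [PySem.List.len_eq]
  rw [hrowlen, Int.toNat_of_nonneg (le_of_lt (lt_of_le_of_lt hi0 hin))]
  -- pointwise: flip A's skip-branch and replace B's row lookup by A's per-pair value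
  apply PySem.List.foldl_congr_mem
  intro acc j hj
  obtain ⟨hj0, hjn⟩ := PySem.List.mem_pyRange_one.mp hj
  rw [pvRow_getD n i j hi0 hin hj0 hjn]
  by_cases h : i = j <;> simp [h, Ne.symm]
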